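-- pv_equiv track=rewrite | github.com/VJMReichenbach/celeste-stats | scripts/format_csv.py | get_max_length_of_columns
-- ===== SOURCE A (Python) =====
-- def get_max_length_of_columns(lines: list[str]) -> dict[int, int]:
--     max_length = {}
--     for line in lines:
--         row = line.split(",")
--         for i in range(len(row)):
--             row[i] = row[i].strip()
--             if i not in max_length:
--                 max_length[i] = len(row[i])
--             elif len(row[i]) > max_length[i]:
--                 max_length[i] = len(row[i])
--     return max_length
-- ===== SOURCE B (Python) =====
-- def get_max_length_of_columns(lines: list[str]) -> dict[int, int]:
--     rows = [[len(field.strip()) for field in line.split(",")] for line in lines]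
--     ncols = max(map(len, rows), default=0)
--     return {i: max(r[i] for r in rows if i < len(r)) for i in range(ncols)}
-- ===== Notes on version B (the rewrite author's own statement) =====
-- stated objective: alternative
-- what changed: B first reduces every line to its list of stripped field lengths, then builds the result column-by-column (one max per column index over the rows long enough), instead of A's row-by-row dict updates with membership tests.
import Mathlib
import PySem

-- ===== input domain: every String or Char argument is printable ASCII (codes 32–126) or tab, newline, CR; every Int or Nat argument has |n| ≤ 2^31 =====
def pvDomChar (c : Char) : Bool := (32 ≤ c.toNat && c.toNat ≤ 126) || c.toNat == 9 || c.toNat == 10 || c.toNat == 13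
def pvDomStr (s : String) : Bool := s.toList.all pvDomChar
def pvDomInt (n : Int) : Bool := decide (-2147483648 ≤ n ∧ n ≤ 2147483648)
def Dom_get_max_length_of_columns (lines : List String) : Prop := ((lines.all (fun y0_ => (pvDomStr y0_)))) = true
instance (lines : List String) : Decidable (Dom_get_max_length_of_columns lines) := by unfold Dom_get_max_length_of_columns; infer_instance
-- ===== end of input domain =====

-- B computes the same dict column-by-column from the stripped field lengths instead of A's
-- row-by-row dict updates; alternative decomposition, no speed claim.

-- ===== PORT A =====
-- body of A's inner 'for i in range(len(row))' loop: row[i] = row[i].strip(), then the if/elif dict update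
def pvAStep (st : List String × PySem.Dict Int Int) (i : Int) : List String × PySem.Dict Int Int :=
  let row := PySem.List.pySetD st.1 i (PySem.Str.strip (PySem.List.pyGetD st.1 i ""))
  let d := st.2
  if ¬ d.contains i then (row, d.insert i (PySem.Str.len (PySem.List.pyGetD row i "")))
  else if PySem.Str.len (PySem.List.pyGetD row i "") > d.getD i 0 then
    (row, d.insert i (PySem.Str.len (PySem.List.pyGetD row i "")))
  else (row, d)

def get_max_length_of_columns (lines : List String) : List (Int × Int) :=
  (lines.foldl (fun (d : PySem.Dict Int Int) line =>
      let row := (PySem.Str.split? line ",").getD []   -- sep "," ≠ "" so split? is always some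
      ((PySem.List.pyRange 0 (PySem.List.len row) 1).foldl pvAStep (row, d)).2)
    PySem.Dict.empty).items

-- ===== PORT B =====
def get_max_length_of_columns_alt (lines : List String) : List (Int × Int) :=
  let rows := lines.map (fun line =>
    ((PySem.Str.split? line ",").getD []).map (fun f => PySem.Str.len (PySem.Str.strip f)))
  let ncols := (PySem.List.max? (rows.map (fun r => PySem.List.len r)) (fun y => y)).getD 0
  (PySem.List.pyRange 0 ncols 1).map (fun i =>
    (i, (PySem.List.max? (rows.filterMap (fun r => PySem.List.pyGet? r i)) (fun y => y)).getD 0))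

-- ===== PRECONDITION & SPEC =====
def Spec_get_max_length_of_columns (lines : List String) (out : List (Int × Int)) : Prop := out = get_max_length_of_columns_alt lines
instance (lines : List String) (out : List (Int × Int)) : Decidable (Spec_get_max_length_of_columns lines out) := by unfold Spec_get_max_length_of_columns; infer_instance

-- ===== CLAIM (what is proved, stated in full; the proofs are below) =====
def Claim_equal_get_max_length_of_columns : Prop := ∀ (lines : List String), Dom_get_max_length_of_columns lines → Spec_get_max_length_of_columns lines (get_max_length_of_columns lines)

-- ===== LEMMAS AND PROOFS =====

-- stripped field lengths of one line (the per-line work both ports share)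
def pvLens (line : String) : List Int :=
  ((PySem.Str.split? line ",").getD []).map (fun f => PySem.Str.len (PySem.Str.strip f))

-- merge one value into position k of the running column maxima (k ≤ ms.length)
def pvUpd (ms : List Int) (k : Nat) (v : Int) : List Int :=
  if h : k < ms.length then ms.set k (max ms[k] v) else ms ++ [v]

def pvMergeAt : List Int → Nat → List Int → List Int
  | ms, _, [] => ms
  | ms, k, v :: ls => pvMergeAt (pvUpd ms k v) (k + 1) ls

def pvBig (lines : List String) (ms : List Int) : List Int :=
  lines.foldl (fun ms l => pvMergeAt ms 0 (pvLens l)) ms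

-- the canonical dict {s: ms[0], s+1: ms[1], …}
def pvCd (ms : List Int) (s : Int) : PySem.Dict Int Int := PySem.Dict.mk (PySem.List.enumerate ms s)

def pvOmax (o o' : Option Int) : Option Int :=
  match o' with
  | none => o
  | some v => some (match o with | none => v | some m => if m < v then v else m)

lemma pvEnum_map_id (t : List Int) (s i : Int) (v : Int) (h : i < s) :
    (PySem.List.enumerate t s).map (fun p => if p.1 == i then (i, v) else p) = PySem.List.enumerate t s := by
  induction t generalizing s with
  | nil => rfl
  | cons a t ih =>
    show ((s, a) :: PySem.List.enumerate t (s+1)).map _ = _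
    simp only [List.map_cons]
    rw [ih (s+1) (by omega)]
    have : ((s : Int) == i) = false := by simp; omega
    simp [this]

lemma pvCd_contains (ms : List Int) (s i : Int) :
    (pvCd ms s).contains i = decide (s ≤ i ∧ i < s + ms.length) := by
  induction ms generalizing s with
  | nil => simp [pvCd, PySem.Dict.contains, PySem.List.enumerate]
  | cons a t ih =>
    show (PySem.Dict.mk ((s, a) :: PySem.List.enumerate t (s+1))).contains i = _
    simp only [PySem.Dict.contains, List.any_cons]
    have := ih (s+1)
    simp only [pvCd, PySem.Dict.contains] at this
    rw [this, Bool.eq_iff_iff]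
    simp only [Bool.or_eq_true, beq_iff_eq, decide_eq_true_eq, List.length_cons]
    push_cast
    omega

lemma pvCd_get (ms : List Int) (s : Int) (k : Nat) (h : k < ms.length) :
    (pvCd ms s).get? (s + k) = some ms[k] := by
  induction ms generalizing s k with
  | nil => simp at h
  | cons a t ih =>
    show (PySem.Dict.mk ((s, a) :: PySem.List.enumerate t (s+1))).get? (s + k) = _
    rw [PySem.Dict.get?_mk_cons]
    cases k with
    | zero => simp
    | succ n =>
      have h1 : ((s:Int) == s + (↑(n+1) : Int)) = false := by simp; omega
      rw [h1]
      simp only [List.getElem_cons_succ]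
      have h2 : s + ((n+1 : Nat) : Int) = (s + 1) + (n : Int) := by push_cast; ring
      rw [if_neg (by simp), h2]
      exact ih (s+1) n (by simpa using h)

lemma pvCd_set (ms : List Int) (s : Int) (k : Nat) (v : Int) (h : k < ms.length) :
    (PySem.List.enumerate ms s).map (fun p => if p.1 == (s + (k : Int)) then ((s + (k : Int)), v) else p)
      = PySem.List.enumerate (ms.set k v) s := by
  induction ms generalizing s k with
  | nil => simp at h
  | cons a t ih =>
    show ((s, a) :: PySem.List.enumerate t (s+1)).map _ = PySem.List.enumerate ((a :: t).set k v) s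
    cases k with
    | zero =>
      show _ = (s, v) :: PySem.List.enumerate t (s+1)
      simp only [List.map_cons, Nat.cast_zero, add_zero, beq_self_eq_true, if_true]
      rw [pvEnum_map_id t (s+1) s v (by omega)]
    | succ n =>
      show _ = (s, a) :: PySem.List.enumerate (t.set n v) (s+1)
      have h2 : s + (((n:Nat) + 1 : Nat) : Int) = (s + 1) + (n : Int) := by push_cast; ring
      simp only [List.map_cons, h2]
      rw [ih (s+1) n (by simpa using h), if_neg (by simp; omega)]

lemma pvUpd_len (ms : List Int) (k : Nat) (v : Int) (hk : k ≤ ms.length) :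
    (pvUpd ms k v).length = max ms.length (k + 1) := by
  unfold pvUpd; split <;> simp <;> omega

lemma pvStep_dict (ms : List Int) (k : Nat) (v : Int) (hk : k ≤ ms.length) :
    (if ¬ (pvCd ms 0).contains (k : Int) then (pvCd ms 0).insert (k : Int) v
     else if v > (pvCd ms 0).getD (k : Int) 0 then (pvCd ms 0).insert (k : Int) v else pvCd ms 0)
      = pvCd (pvUpd ms k v) 0 := by
  by_cases h : k < ms.length
  · have hc : (pvCd ms 0).contains (k : Int) = true := by
      rw [pvCd_contains]; simp; omega
    have hg : (pvCd ms 0).getD (k : Int) 0 = ms[k] := by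
      rw [PySem.Dict.getD_eq_get?_getD, show ((k:Int)) = 0 + (k:Int) from by ring, pvCd_get ms 0 k h]
      rfl
    have hins : (pvCd ms 0).insert (k : Int) v = pvCd (ms.set k v) 0 := by
      apply PySem.Dict.ext
      rw [PySem.Dict.items_insert_of_contains _ _ hc]
      show (PySem.List.enumerate ms 0).map _ = _
      have := pvCd_set ms 0 k v h
      simpa using this
    rw [if_neg (by simp [hc]), hg]
    unfold pvUpd
    rw [dif_pos h]
    by_cases hv : v > ms[k]
    · rw [if_pos hv, hins, max_eq_right (le_of_lt hv)]
    · rw [if_neg hv, max_eq_left (by omega), List.set_getElem_self]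
  · have hke : k = ms.length := by omega
    have hc : (pvCd ms 0).contains (k : Int) = false := by
      rw [pvCd_contains]; simp; omega
    rw [if_pos (by simp [hc])]
    have : (pvCd ms 0).insert (k : Int) v = pvCd (ms ++ [v]) 0 := by
      apply PySem.Dict.ext
      rw [PySem.Dict.items_insert_of_not_contains _ _ hc]
      show PySem.List.enumerate ms 0 ++ [((k:Int), v)] = PySem.List.enumerate (ms ++ [v]) 0
      rw [PySem.List.enumerate_append]
      subst hke
      congr 1
      show _ = [((0:Int) + (ms.length:Int), v)]
      norm_num
    rw [this]
    unfold pvUpd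
    rw [dif_neg h]

lemma pvInner (m k : Nat) (r : List String) (ms : List Int)
    (hr : r.length = k + m) (hk : k ≤ ms.length) :
    ((PySem.List.pyRange (k : Int) (r.length : Int) 1).foldl pvAStep (r, pvCd ms 0)).2
      = pvCd (pvMergeAt ms k ((r.drop k).map (fun f => PySem.Str.len (PySem.Str.strip f)))) 0 := by
  induction m generalizing k r ms with
  | zero =>
    rw [PySem.List.pyRange_one_eq_nil (by omega)]
    rw [List.drop_eq_nil_of_le (by omega)]
    rfl
  | succ m ih =>
    have hklt : k < r.length := by omega
    rw [PySem.List.pyRange_one_cons (by exact_mod_cast hklt)]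
    simp only [List.foldl_cons]
    have hset : PySem.List.pySetD r (k:Int) (PySem.Str.strip (PySem.List.pyGetD r (k:Int) ""))
        = r.set k (PySem.Str.strip r[k]) := by
      simp [PySem.List.pySetD, PySem.List.pySet?, PySem.List.pyIdx?, hklt,
        PySem.List.pyGetD_natCast, List.getD_eq_getElem?_getD]
    have hget : PySem.List.pyGetD (r.set k (PySem.Str.strip r[k])) (k:Int) ""
        = PySem.Str.strip r[k] := by
      simp [PySem.List.pyGetD_natCast, List.getD_eq_getElem?_getD, hklt]
    have hstep : pvAStep (r, pvCd ms 0) (k:Int)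
        = (r.set k (PySem.Str.strip r[k]), pvCd (pvUpd ms k (PySem.Str.len (PySem.Str.strip r[k]))) 0) := by
      unfold pvAStep
      simp only [hset, hget]
      rw [← pvStep_dict ms k _ hk]
      split
      · rfl
      · split <;> rfl
    rw [hstep]
    have hcast : (k : Int) + 1 = ((k + 1 : Nat) : Int) := by push_cast; ring
    have hlen : (r.set k (PySem.Str.strip r[k])).length = r.length := by simp
    rw [hcast, ← hlen]
    rw [ih (k+1) _ _ (by simpa using (by omega : r.length = (k+1) + m))
        (by rw [pvUpd_len ms k _ hk]; omega)]
    congr 1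
    have hdrop : (r.set k (PySem.Str.strip r[k])).drop (k+1) = r.drop (k+1) := by
      rw [List.drop_set]; simp
    rw [hdrop]
    rw [List.drop_eq_getElem_cons hklt]
    rfl

lemma pvInner0 (r : List String) (ms : List Int) :
    ((PySem.List.pyRange 0 (r.length : Int) 1).foldl pvAStep (r, pvCd ms 0)).2
      = pvCd (pvMergeAt ms 0 (r.map (fun f => PySem.Str.len (PySem.Str.strip f)))) 0 := by
  have := pvInner r.length 0 r ms (by omega) (by omega)
  simpa using this

lemma pvOuter (lines : List String) (ms : List Int) :
    lines.foldl (fun (d : PySem.Dict Int Int) line =>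
        let row := (PySem.Str.split? line ",").getD []
        ((PySem.List.pyRange 0 (PySem.List.len row) 1).foldl pvAStep (row, d)).2)
      (pvCd ms 0) = pvCd (pvBig lines ms) 0 := by
  induction lines generalizing ms with
  | nil => rfl
  | cons l lines ih =>
    simp only [List.foldl_cons]
    have h0 : PySem.List.len ((PySem.Str.split? l ",").getD []) = ((((PySem.Str.split? l ",").getD []).length : Nat) : Int) := rfl
    rw [h0, pvInner0 _ ms]
    exact ih (pvMergeAt ms 0 (pvLens l))

lemma pvMergeAt_len (ls : List Int) (ms : List Int) (k : Nat) (hk : k ≤ ms.length) :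
    (pvMergeAt ms k ls).length = max ms.length (k + ls.length) := by
  induction ls generalizing ms k with
  | nil => simp [pvMergeAt]; omega
  | cons v ls ih =>
    show (pvMergeAt (pvUpd ms k v) (k+1) ls).length = _
    rw [ih (pvUpd ms k v) (k+1) (by rw [pvUpd_len ms k v hk]; omega), pvUpd_len ms k v hk]
    simp; omega

lemma pvUpd_get (ms : List Int) (k : Nat) (v : Int) (j : Nat) (hk : k ≤ ms.length) :
    (pvUpd ms k v)[j]? = if j = k then some (match ms[k]? with | none => v | some m => if m < v then v else m)
      else ms[j]? := by
  unfold pvUpd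
  split
  · rename_i h
    rw [List.getElem?_set]
    split
    · rename_i hj; subst hj
      rw [if_pos rfl, List.getElem?_eq_getElem h]
      show some (max ms[k] v) = some (if ms[k] < v then v else ms[k])
      rw [max_def]
      split_ifs <;> simp only [Option.some_inj] <;> omega
    · rename_i hj; rw [if_neg (by omega)]
  · rename_i h
    have hke : k = ms.length := by omega
    subst hke
    by_cases hj : j = ms.length
    · subst hj
      rw [if_pos rfl, List.getElem?_append_right (by omega)]
      simp
    · rw [if_neg hj]
      by_cases hjl : j < ms.length
      · rw [List.getElem?_append_left hjl]
      · rw [List.getElem?_eq_none (by simp; omega), List.getElem?_eq_none (by omega)]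

lemma pvMergeAt_frozen (ls : List Int) (ms : List Int) (k j : Nat) (hk : k ≤ ms.length) (hj : j < k) :
    (pvMergeAt ms k ls)[j]? = ms[j]? := by
  induction ls generalizing ms k with
  | nil => rfl
  | cons v ls ih =>
    show (pvMergeAt (pvUpd ms k v) (k+1) ls)[j]? = _
    rw [ih (pvUpd ms k v) (k+1) (by rw [pvUpd_len ms k v hk]; omega) (by omega),
      pvUpd_get ms k v j hk, if_neg (by omega)]

lemma pvMergeAt_get (ls : List Int) (ms : List Int) (k j : Nat) (hk : k ≤ ms.length) (hj : k ≤ j) :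
    (pvMergeAt ms k ls)[j]? = pvOmax ms[j]? ls[j - k]? := by
  induction ls generalizing ms k with
  | nil => simp [pvMergeAt, pvOmax]
  | cons v ls ih =>
    show (pvMergeAt (pvUpd ms k v) (k+1) ls)[j]? = _
    by_cases hjk : j = k
    · subst hjk
      rw [pvMergeAt_frozen ls _ (j+1) j (by rw [pvUpd_len ms j v hk]; omega) (by omega),
        pvUpd_get ms j v j hk, if_pos rfl]
      simp [pvOmax]
    · rw [ih (pvUpd ms k v) (k+1) (by rw [pvUpd_len ms k v hk]; omega) (by omega),
        pvUpd_get ms k v j hk, if_neg hjk]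
      have : j - k = (j - (k+1)) + 1 := by omega
      rw [this]
      rfl

lemma pvBig_get (lines : List String) (ms : List Int) (j : Nat) :
    (pvBig lines ms)[j]? = lines.foldl (fun o l => pvOmax o (pvLens l)[j]?) ms[j]? := by
  induction lines generalizing ms with
  | nil => rfl
  | cons l lines ih =>
    show (pvBig lines (pvMergeAt ms 0 (pvLens l)))[j]? = _
    rw [ih, pvMergeAt_get (pvLens l) ms 0 j (by omega) (by omega)]
    rfl

lemma pvBig_len (lines : List String) (ms : List Int) :
    (pvBig lines ms).length = lines.foldl (fun n l => max n (pvLens l).length) ms.length := by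
  induction lines generalizing ms with
  | nil => rfl
  | cons l lines ih =>
    show (pvBig lines (pvMergeAt ms 0 (pvLens l))).length = _
    rw [ih, pvMergeAt_len (pvLens l) ms 0 (by omega)]
    simp

lemma pvFoldlMaxCast (ls : List String) (x : Nat) :
    (ls.map (fun l => ((pvLens l).length : Int))).foldl max (x : Int)
      = ((ls.foldl (fun n l => max n (pvLens l).length) x : Nat) : Int) := by
  induction ls generalizing x with
  | nil => rfl
  | cons l ls ih =>
    simp only [List.map_cons, List.foldl_cons]
    rw [← Nat.cast_max, ih]

lemma pvNcols (lines : List String) :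
    (PySem.List.max? (lines.map (fun l => PySem.List.len (pvLens l))) (fun y => y)).getD 0
      = ((pvBig lines []).length : Int) := by
  rw [pvBig_len lines []]
  cases lines with
  | nil => rfl
  | cons l ls =>
    simp only [List.map_cons, List.foldl_cons]
    rw [PySem.List.max?_id_cons]
    show (ls.map (fun l => PySem.List.len (pvLens l))).foldl max ((pvLens l).length : Int) = _
    have : (fun l => PySem.List.len (pvLens l)) = (fun l => ((pvLens l).length : Int)) := rfl
    rw [this, pvFoldlMaxCast]
    simp

lemma pvColMax (lines : List String) (j : Nat) :
    PySem.List.max? (lines.filterMap (fun l => (pvLens l)[j]?)) (fun y => y)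
      = (pvBig lines [])[j]? := by
  rw [pvBig_get lines [] j]
  show (lines.filterMap (fun l => (pvLens l)[j]?)).foldl _ none = _
  rw [List.foldl_filterMap]
  show lines.foldl _ none = _
  congr 1
  funext o l
  cases h : (pvLens l)[j]? with
  | none => simp [pvOmax]
  | some v =>
    cases o with
    | none => rfl
    | some m => exact (apply_ite some (m < v) v m).symm

lemma pvMain (lines : List String) : get_max_length_of_columns lines = get_max_length_of_columns_alt lines := by
  have hA : get_max_length_of_columns lines = (pvCd (pvBig lines []) 0).items := by
    unfold get_max_length_of_columns
    rw [show (PySem.Dict.empty : PySem.Dict Int Int) = pvCd [] 0 from rfl, pvOuter lines []]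
  have hB : get_max_length_of_columns_alt lines
      = (PySem.List.pyRange 0 ((pvBig lines []).length : Int) 1).map
          (fun i => (i, (PySem.List.max? ((lines.map pvLens).filterMap (fun r => PySem.List.pyGet? r i)) (fun y => y)).getD 0)) := by
    unfold get_max_length_of_columns_alt
    show (PySem.List.pyRange 0 ((PySem.List.max? ((lines.map pvLens).map (fun r => PySem.List.len r)) (fun y => y)).getD 0) 1).map _ = _
    rw [List.map_map, show ((fun r => PySem.List.len r) ∘ pvLens) = (fun l => PySem.List.len (pvLens l)) from rfl, pvNcols]
    rfl
  rw [hA, hB]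
  show PySem.List.enumerate (pvBig lines []) 0 = _
  rw [PySem.List.enumerate_eq_map_pyRange (pvBig lines []) 0]
  rw [show PySem.List.len (pvBig lines []) = ((pvBig lines []).length : Int) from rfl]
  apply List.map_congr_left
  intro i hi
  rw [PySem.List.mem_pyRange_one] at hi
  have hj : i = (i.toNat : Int) := (Int.toNat_of_nonneg hi.1).symm
  have hjlt : i.toNat < (pvBig lines []).length := by omega
  rw [hj]
  have hL : PySem.List.pyGetD (pvBig lines []) ((i.toNat : Nat) : Int) 0 = (pvBig lines [])[i.toNat] := by
    rw [PySem.List.pyGetD_natCast, List.getD_eq_getElem?_getD, List.getElem?_eq_getElem hjlt]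
    rfl
  rw [hL]
  have hR : (lines.map pvLens).filterMap (fun r => PySem.List.pyGet? r ((i.toNat : Nat) : Int))
      = lines.filterMap (fun l => (pvLens l)[i.toNat]?) := by
    rw [List.filterMap_map]
    congr 1
    funext l
    rw [Function.comp_apply, PySem.List.pyGet?_natCast]
  rw [hR, pvColMax lines i.toNat, List.getElem?_eq_getElem hjlt]
  rfl

-- ===== VERDICT (by name: the statement is the Claim_ definition above) =====
theorem get_max_length_of_columns_spec : Claim_equal_get_max_length_of_columns := by
  intro lines _
  exact pvMain lines
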